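-- pv_equiv track=rewrite | github.com/HomericIntelligence/ProjectHephaestus | hephaestus/validation/markdown.py | _count_multiple_blank_lines
-- ===== SOURCE A (Python) =====
-- def _count_multiple_blank_lines(lines: list[str]) -> int:
--     """Count occurrences of multiple consecutive blank lines."""
--     count = 0
--     blank_count = 0
--     for line in lines:
--         if line.strip() == "":
--             blank_count += 1
--             if blank_count > 1:
--                 count += 1
--         else:
--             blank_count = 0
--     return count
-- ===== SOURCE B (Python) =====
-- from itertools import groupby
--
--
-- def _count_multiple_blank_lines(lines: list[str]) -> int:
--     """Count occurrences of multiple consecutive blank lines."""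
--     total = 0
--     for is_blank, group in groupby(lines, key=lambda line: line.strip() == ""):
--         if is_blank:
--             total += sum(1 for _ in group) - 1
--     return total
-- ===== Notes on version B (the rewrite author's own statement) =====
-- stated objective: idiomatic
-- what changed: Replaced the running blank_count/branch accumulator with itertools.groupby: group consecutive lines by blank-ness and add (run length - 1) for each blank run.
import Mathlib
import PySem

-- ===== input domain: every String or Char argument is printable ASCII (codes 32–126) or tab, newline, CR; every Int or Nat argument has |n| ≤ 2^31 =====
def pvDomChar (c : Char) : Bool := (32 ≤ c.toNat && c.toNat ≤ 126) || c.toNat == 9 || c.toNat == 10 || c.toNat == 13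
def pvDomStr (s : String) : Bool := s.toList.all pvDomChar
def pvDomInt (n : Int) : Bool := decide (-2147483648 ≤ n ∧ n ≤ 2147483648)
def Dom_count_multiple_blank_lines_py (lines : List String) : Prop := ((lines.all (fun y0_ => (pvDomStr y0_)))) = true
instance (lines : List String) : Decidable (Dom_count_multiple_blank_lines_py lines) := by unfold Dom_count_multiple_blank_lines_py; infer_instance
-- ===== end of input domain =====

-- B replaces A's running blank_count/branch accumulator by grouping consecutive lines
-- by blank-ness (itertools.groupby) and summing (run length - 1) over the blank runs;
-- objective: idiomatic. Both are total; return values agree on every input.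

-- ===== PORT A =====
-- literal transliteration of A's loop body: state = (count, blank_count)
def pvStepA (st : Int × Int) (line : String) : Int × Int :=
  if PySem.Str.strip line == "" then
    let blank_count := st.2 + 1
    (if blank_count > 1 then st.1 + 1 else st.1, blank_count)
  else
    (st.1, 0)

def count_multiple_blank_lines_py (lines : List String) : Int :=
  (lines.foldl pvStepA (0, 0)).1

-- ===== PORT B =====
-- the blank-ness key of Source B: line.strip() == ""
def pvBlank (line : String) : Bool := PySem.Str.strip line == ""

-- itertools.groupby(lines, key=pvBlank), keeping for each group its key and its
-- length (Source B only uses the group's length, via sum(1 for _ in group))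
def pvGroups : List String → List (Bool × Nat)
  | [] => []
  | x :: xs =>
    match pvGroups xs with
    | [] => [(pvBlank x, 1)]
    | (k, n) :: rest =>
      if pvBlank x == k then (k, n + 1) :: rest
      else (pvBlank x, 1) :: (k, n) :: rest

-- Source B's for loop over the groups, accumulating total
def count_multiple_blank_lines_py_alt (lines : List String) : Int :=
  (pvGroups lines).foldl
    (fun total g => if g.1 then total + ((g.2 : Int) - 1) else total) 0

-- ===== PRECONDITION & SPEC =====
def Spec_count_multiple_blank_lines_py (lines : List String) (out : Int) : Prop := out = count_multiple_blank_lines_py_alt lines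
instance (lines : List String) (out : Int) : Decidable (Spec_count_multiple_blank_lines_py lines out) := by unfold Spec_count_multiple_blank_lines_py; infer_instance

-- ===== CLAIM (what is proved, stated in full; the proofs are below) =====
def Claim_equal_count_multiple_blank_lines_py : Prop := ∀ (lines : List String), Dom_count_multiple_blank_lines_py lines → Spec_count_multiple_blank_lines_py lines (count_multiple_blank_lines_py lines)

-- ===== LEMMAS AND PROOFS =====

-- common intermediate form: phi ls b = contribution of ls when "previous line was
-- blank" is b
def pvPhi : List String → Bool → Int
  | [], _ => 0
  | l :: ls, b =>
    if pvBlank l then (if b then 1 else 0) + pvPhi ls true else pvPhi ls false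

def pvHeadBlank : List String → Bool
  | [] => false
  | l :: _ => pvBlank l

def pvSumG : List (Bool × Nat) → Int
  | [] => 0
  | g :: gs => (if g.1 then (g.2 : Int) - 1 else 0) + pvSumG gs

theorem pvPhi_true (ls : List String) :
    pvPhi ls true = pvPhi ls false + (if pvHeadBlank ls then 1 else 0) := by
  cases ls with
  | nil => simp [pvPhi, pvHeadBlank]
  | cons l t =>
    simp only [pvPhi, pvHeadBlank]
    by_cases h : pvBlank l <;> simp [h] <;> ring

theorem pvLoopA (ls : List String) :
    ∀ (c bc : Int), 0 ≤ bc →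
      (ls.foldl pvStepA (c, bc)).1 = c + pvPhi ls (decide (0 < bc)) := by
  induction ls with
  | nil => intro c bc _; simp [pvPhi]
  | cons l t ih =>
    intro c bc hbc
    rw [List.foldl_cons]
    by_cases hb : PySem.Str.strip l == ""
    · rw [show pvStepA (c, bc) l = (if bc + 1 > 1 then c + 1 else c, bc + 1) from by
        simp [pvStepA, hb]]
      by_cases hpos : bc + 1 > 1
      · rw [if_pos hpos, ih (c + 1) (bc + 1) (by omega)]
        have h0 : decide ((0 : Int) < bc) = true := by simp; omega
        simp [pvPhi, pvBlank, hb, h0, hbc]; ring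
      · rw [if_neg hpos, ih c (bc + 1) (by omega)]
        have h0 : decide ((0 : Int) < bc) = false := by simp; omega
        simp [pvPhi, pvBlank, hb, h0, hbc]
    · rw [show pvStepA (c, bc) l = (c, 0) from by simp [pvStepA, hb]]
      rw [ih c 0 le_rfl]
      simp [pvPhi, pvBlank, hb]

theorem pvGroups_ne_nil (x : String) (xs : List String) : pvGroups (x :: xs) ≠ [] := by
  simp only [pvGroups]
  cases h : pvGroups xs with
  | nil => simp
  | cons g gs => by_cases hk : pvBlank x == g.1 <;> simp [hk]

theorem pvGroups_head_key (x : String) (xs : List String) (k : Bool) (n : Nat)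
    (gs : List (Bool × Nat)) (h : pvGroups (x :: xs) = (k, n) :: gs) : k = pvBlank x := by
  cases hg : pvGroups xs with
  | nil =>
    have hred : pvGroups (x :: xs) = [(pvBlank x, 1)] := by simp [pvGroups, hg]
    rw [hred] at h
    injection h with h1 _
    injection h1 with ha _
    exact ha.symm
  | cons g t =>
    obtain ⟨k', n'⟩ := g
    have hred : pvGroups (x :: xs)
        = if pvBlank x == k' then (k', n' + 1) :: t
          else (pvBlank x, 1) :: (k', n') :: t := by
      simp [pvGroups, hg]
    rw [hred] at h
    by_cases hk : pvBlank x = k'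
    · rw [if_pos (by simpa using hk)] at h
      injection h with h1 _
      injection h1 with ha _
      rw [← ha, hk]
    · rw [if_neg (by simpa using hk)] at h
      injection h with h1 _
      injection h1 with ha _
      exact ha.symm

theorem pvSumG_groups (ls : List String) : pvSumG (pvGroups ls) = pvPhi ls false := by
  induction ls with
  | nil => simp [pvGroups, pvSumG, pvPhi]
  | cons x xs ih =>
    have hphi : pvPhi (x :: xs) false
        = if pvBlank x then pvPhi xs false + (if pvHeadBlank xs then 1 else 0)
          else pvPhi xs false := by
      simp only [pvPhi]
      by_cases h : pvBlank x <;> simp [h, pvPhi_true]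
    rw [hphi]
    cases hg : pvGroups xs with
    | nil =>
      have hxs : xs = [] := by
        cases xs with
        | nil => rfl
        | cons y ys => exact absurd hg (pvGroups_ne_nil y ys)
      subst hxs
      simp only [pvGroups, pvSumG, pvHeadBlank, pvPhi]
      by_cases h : pvBlank x <;> simp [h]
    | cons g gs =>
      obtain ⟨k, n⟩ := g
      have hhead : pvHeadBlank xs = k := by
        cases xs with
        | nil => simp [pvGroups] at hg
        | cons y ys =>
          simpa [pvHeadBlank] using (pvGroups_head_key y ys k n gs hg).symm
      rw [hg, pvSumG] at ih
      simp only [pvGroups, hg]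
      by_cases hke : pvBlank x = k
      · rw [if_pos (by simpa using hke), pvSumG]
        rw [hhead, hke]
        cases k <;> simp_all <;> push_cast <;> omega
      · rw [if_neg (by simpa using hke), pvSumG, pvSumG]
        rw [hhead]
        cases k <;> cases hbx : pvBlank x <;> simp_all <;> omega

theorem pvFoldl_sumG (gs : List (Bool × Nat)) : ∀ (a : Int),
    gs.foldl (fun total g => if g.1 then total + ((g.2 : Int) - 1) else total) a
      = a + pvSumG gs := by
  induction gs with
  | nil => intro a; simp [pvSumG]
  | cons g t ih =>
    intro a
    simp only [List.foldl, pvSumG]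
    by_cases h : g.1 <;> simp [h, ih] <;> ring

-- ===== VERDICT (by name: the statement is the Claim_ definition above) =====
theorem count_multiple_blank_lines_py_spec : Claim_equal_count_multiple_blank_lines_py := by
  intro lines _
  unfold Spec_count_multiple_blank_lines_py count_multiple_blank_lines_py count_multiple_blank_lines_py_alt
  rw [pvLoopA lines 0 0 le_rfl, pvFoldl_sumG, pvSumG_groups]
  simp
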